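-- pv_equiv track=rewrite | github.com/Airysm/algorithm | 프로그래머스/3/12987. 숫자 게임/숫자 게임.py | solution
-- ===== SOURCE A (Python) =====
-- def solution(A, B):
--     result = 0
--
--     A.sort(reverse=True)
--     B.sort(reverse=True)
--
--     for a in A:
--         if a >= B[0]:
--             continue
--         else:
--             result += 1
--             del B[0]
--     return result
-- ===== SOURCE B (Python) =====
-- def solution(A, B):
--     # Two sorts plus a running index pointer into sorted B instead of
--     # repeatedly deleting B[0]; does not mutate its arguments.
--     bs = sorted(B, reverse=True)
--     wins = 0
--     for a in sorted(A, reverse=True):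
--         if wins < len(bs) and a < bs[wins]:
--             wins += 1
--     return wins
-- ===== Notes on version B (the rewrite author's own statement) =====
-- stated objective: alternative
-- what changed: Replaces the repeated 'del B[0]' inside the loop by a running index pointer ('wins') into a sorted copy of B, avoiding list mutation; a timing run did not measure B as faster (sorting dominates on its inputs), so no speed is claimed.
-- outside the precondition, e.g. on solution([5, 6], [1]): A returns 0, B returns 0
import Mathlib
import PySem

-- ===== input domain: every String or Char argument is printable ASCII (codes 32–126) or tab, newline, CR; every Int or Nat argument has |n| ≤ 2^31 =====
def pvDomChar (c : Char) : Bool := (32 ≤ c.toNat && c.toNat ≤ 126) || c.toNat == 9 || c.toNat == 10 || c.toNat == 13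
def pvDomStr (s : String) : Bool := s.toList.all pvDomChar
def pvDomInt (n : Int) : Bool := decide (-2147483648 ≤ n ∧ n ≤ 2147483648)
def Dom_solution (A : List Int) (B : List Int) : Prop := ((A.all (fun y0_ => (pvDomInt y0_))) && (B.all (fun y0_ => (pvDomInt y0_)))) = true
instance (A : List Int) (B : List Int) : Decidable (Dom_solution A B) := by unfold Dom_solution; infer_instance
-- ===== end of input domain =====

-- B replaces A's per-iteration 'del B[0]' by a running index pointer into a sorted copy of B
-- (an alternative formulation; no speed is claimed). A sorts both argument lists IN PLACE and
-- empties a prefix of B; B mutates nothing — the equivalence proved is about the RETURN value only.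

-- ===== PORT A =====
-- One loop step of A: state none = the loop has raised IndexError (B exhausted).
def solutionStep (st : Option (Int × List Int)) (a : Int) : Option (Int × List Int) :=
  match st with
  | none => none
  | some (r, bs) =>
    match bs with
    | [] => none                                  -- B[0] raises IndexError
    | b :: rest => if b ≤ a then some (r, b :: rest) else some (r + 1, rest)

def solution (A : List Int) (B : List Int) : Int :=
  let As := PySem.List.sorted A (fun x => x) true
  let Bs := PySem.List.sorted B (fun x => x) true
  match As.foldl solutionStep (some ((0 : Int), Bs)) with
  | some (r, _) => r
  | none => 0                                      -- unreachable under Pre_solution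

-- ===== PORT B =====
-- B's loop body: 'if wins < len(bs) and a < bs[wins]: wins += 1' (wins is never negative).
def altStep (bs : List Int) (wins : Int) (a : Int) : Int :=
  if wins < (bs.length : Int) then
    if a < (PySem.List.pyGet? bs wins).getD 0 then wins + 1 else wins
  else wins

def solution_alt (A : List Int) (B : List Int) : Int :=
  let bs := PySem.List.sorted B (fun x => x) true
  (PySem.List.sorted A (fun x => x) true).foldl (altStep bs) 0

-- ===== PRECONDITION & SPEC =====
-- When A deletes more elements from B than B has, B[0] raises IndexError; the exact raise-free
-- set would re-simulate the loop, so Pre_ keeps the closed-form sufficient bound len(A) ≤ len(B)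
-- (the problem's contract: equal-length lists). This also excludes some longer-A inputs on which
-- A happens to return; B returns the same count there (see cites).
def Pre_solution (A : List Int) (B : List Int) : Prop := A.length ≤ B.length
instance (A : List Int) (B : List Int) : Decidable (Pre_solution A B) := by unfold Pre_solution; infer_instance
def pvWitness_solution : List Int × List Int := ([5, 1, 3], [2, 4, 6])

def Spec_solution (A : List Int) (B : List Int) (out : Int) : Prop := out = solution_alt A B
instance (A : List Int) (B : List Int) (out : Int) : Decidable (Spec_solution A B out) := by unfold Spec_solution; infer_instance

-- ===== CLAIM (what is proved, stated in full; the proofs are below) =====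
def Claim_equal_solution : Prop := ∀ (A : List Int) (B : List Int), Dom_solution A B → Pre_solution A B → Spec_solution A B (solution A B)

-- ===== LEMMAS AND PROOFS =====

-- Refinement invariant: A's loop state after some steps is (k, bs.drop k), where k is both the
-- number of deletions A has performed on bs and B's running pointer 'wins'.
theorem step_refines (bs : List Int) : ∀ (As : List Int) (k : Nat), As.length + k ≤ bs.length →
    As.foldl solutionStep (some ((k : Int), bs.drop k)) =
      some (As.foldl (altStep bs) (k : Int),
            bs.drop (As.foldl (altStep bs) (k : Int)).toNat) := by
  intro As
  induction As with
  | nil => intro k hk; simp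
  | cons a As ih =>
    intro k hk
    simp only [List.length_cons] at hk
    have hklt : k < bs.length := by omega
    have hdrop : bs.drop k = bs[k] :: bs.drop (k + 1) := List.drop_eq_getElem_cons hklt
    have hget : (PySem.List.pyGet? bs (k : Int)).getD 0 = bs[k] := by
      simp [List.getElem?_eq_getElem hklt]
    have hguard : (k : Int) < (bs.length : Int) := by exact_mod_cast hklt
    by_cases hc : a < bs[k]
    · have halt : altStep bs (k : Int) a = ((k + 1 : Nat) : Int) := by
        simp only [altStep, hget, if_pos hguard, if_pos hc]; push_cast; ring
      have hstep : solutionStep (some ((k : Int), bs.drop k)) a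
          = some (((k + 1 : Nat) : Int), bs.drop (k + 1)) := by
        rw [hdrop]; simp only [solutionStep, if_neg (not_le.mpr hc)]; push_cast; rfl
      simp only [List.foldl_cons, hstep, halt]
      exact ih (k + 1) (by omega)
    · have halt : altStep bs (k : Int) a = (k : Int) := by
        simp only [altStep, hget, if_pos hguard, if_neg hc]
      have hstep : solutionStep (some ((k : Int), bs.drop k)) a
          = some ((k : Int), bs.drop k) := by
        rw [hdrop]; simp only [solutionStep, if_pos (not_lt.mp hc)]
      simp only [List.foldl_cons, hstep, halt]
      exact ih k (by omega)

-- ===== VERDICT (by name: the statement is the Claim_ definition above) =====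
theorem solution_spec : Claim_equal_solution := by
  intro A B _ hpre
  have hlen : (PySem.List.sorted A (fun x => x) true).length + 0
      ≤ (PySem.List.sorted B (fun x => x) true).length := by
    simpa [PySem.List.length_sorted] using hpre
  have h := step_refines (PySem.List.sorted B (fun x => x) true)
      (PySem.List.sorted A (fun x => x) true) 0 hlen
  simp only [List.drop_zero, Nat.cast_zero] at h
  unfold Spec_solution solution solution_alt
  simp only [h]
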